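-- pv_equiv track=rewrite | github.com/Incutero/flovary | tests/006_ps4_test.py | subsequenceHashes
-- ===== SOURCE A (Python) =====
-- class dnaRollingHash(object):
--
--     def __init__(self,s):
--         self.seqlen = len(s)
--         ind = len(s) - 1
--         h = 0
--         self.p = 7368787
--         self.base = 1
--         self.baseDict = {'A': 1, 'T': 2, 'G': 3, 'C': 4, 'a': 1, 't': 2, 'g': 3, 'c': 4}
--         for i in range(len(s)-1,-1,-1):
-- ##            h += (self.baseDict.get(s[i],0)) * self.base
--             h = (h+(self.baseDict.get(s[i],0)) * self.base)#%self.p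
--             if i != 0:
-- ##                self.base = self.base * 5
--                 self.base = (self.base * 5)#%self.p
--         self.currentHash = (h)
--
--     def getHash(self):
--         return self.currentHash
--
--     def nextHash(self, prevItem, nextItem):
-- ##        self.currentHash = (self.currentHash - (self.baseDict.get(prevItem,0))*(self.base))
-- ##        self.currentHash = (self.currentHash*5 + (self.baseDict.get(nextItem,0)))
--         self.currentHash = (5*(self.currentHash - (self.baseDict.get(prevItem,0))*(self.base))+ (self.baseDict.get(nextItem,0)))#%self.p
--         return (self.currentHash)
--
-- def subsequenceHashes(seq, k):
--     rollingHash = dnaRollingHash(seq[0:k])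
--     firstInd = 0
--     nextInd = k
--     yield [rollingHash.getHash(), firstInd]
--     while nextInd < len(seq):
--         yield [rollingHash.nextHash(seq[firstInd], seq[nextInd]), (firstInd+1)]
--         firstInd += 1
--         nextInd += 1
-- ===== SOURCE B (Python) =====
-- def subsequenceHashes(seq, k):
--     baseDict = {'A': 1, 'T': 2, 'G': 3, 'C': 4, 'a': 1, 't': 2, 'g': 3, 'c': 4}
--     n = len(seq)
--     i = 0
--     while True:
--         h = 0
--         for c in seq[i:i+k]:
--             h = h * 5 + baseDict.get(c, 0)
--         yield [h, i]
--         i += 1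
--         if i + k > n:
--             break
-- ===== Notes on version B (the rewrite author's own statement) =====
-- stated objective: simpler
-- what changed: Replaces the rolling-hash class (incremental hash updated per shift) with a plain generator that recomputes each window's hash from scratch by a Horner fold over the slice.
-- intended difference: For k = 0 on a string containing an A/T/G/C letter (either case) A yields garbage hashes rolled out of leftover loop state (e.g. -4 for 'A') while B yields 0 for every empty window, which is the intended hash of an empty window. — e.g. on subsequenceHashes("A", 0): A returns [[0, 0], [-4, 1]], B returns [[0, 0], [0, 1]]
import Mathlib
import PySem

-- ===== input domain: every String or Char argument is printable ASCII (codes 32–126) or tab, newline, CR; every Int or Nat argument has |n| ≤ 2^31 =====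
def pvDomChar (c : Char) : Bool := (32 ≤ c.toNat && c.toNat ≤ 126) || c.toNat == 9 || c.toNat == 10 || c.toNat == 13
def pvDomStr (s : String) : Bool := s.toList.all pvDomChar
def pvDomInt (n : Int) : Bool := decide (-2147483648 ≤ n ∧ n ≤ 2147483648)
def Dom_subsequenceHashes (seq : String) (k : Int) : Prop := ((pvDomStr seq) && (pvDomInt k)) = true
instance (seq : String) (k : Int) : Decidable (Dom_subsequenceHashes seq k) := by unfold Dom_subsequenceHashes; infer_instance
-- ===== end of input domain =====

-- B drops A's rolling-hash class and recomputes each window hash by a Horner fold over the slice: simpler, not faster.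

-- ===== PORT A =====
def pvBaseDict : PySem.Dict Char Int :=
  PySem.Dict.ofList [('A',1),('T',2),('G',3),('C',4),('a',1),('t',2),('g',3),('c',4)]

-- dnaRollingHash.__init__ on s = seq[0:k]: returns (currentHash, base)
def pvInitA (s : List Char) : Int × Int :=
  (PySem.List.pyRange ((s.length : Int) - 1) (-1) (-1)).foldl
    (fun (st : Int × Int) i =>
      let h := st.1 + (PySem.Dict.getD pvBaseDict (PySem.List.pyGetD s i ' ') 0) * st.2
      let base := if i ≠ 0 then st.2 * 5 else st.2
      (h, base))
    (0, 1)

-- dnaRollingHash.nextHash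
def pvNextA (h base : Int) (p nx : Char) : Int :=
  5 * (h - (PySem.Dict.getD pvBaseDict p 0) * base) + PySem.Dict.getD pvBaseDict nx 0

-- the while-loop of subsequenceHashes; fuel bounds the iteration count exactly on Pre_ (k ≥ 0).
-- pyGetD with a dummy default is exact here: on Pre_ both indices are always in range.
def pvLoopA (cs : List Char) (firstInd nextInd h base : Int) : Nat → List (List Int)
  | 0 => []
  | Nat.succ f =>
    if nextInd < (cs.length : Int) then
      let h' := pvNextA h base (PySem.List.pyGetD cs firstInd ' ') (PySem.List.pyGetD cs nextInd ' ')
      [h', firstInd + 1] :: pvLoopA cs (firstInd + 1) (nextInd + 1) h' base f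
    else []

def subsequenceHashes (seq : String) (k : Int) : List (List Int) :=
  let cs := seq.toList
  let st := pvInitA (PySem.List.slice cs (some 0) (some k))
  [st.1, 0] :: pvLoopA cs 0 k st.1 st.2 (((cs.length : Int) - k).toNat)

-- ===== PORT B =====
-- hash of one window, Horner fold (the inner for-loop of Source B)
def pvHashB (w : List Char) : Int :=
  w.foldl (fun h c => h * 5 + PySem.Dict.getD pvBaseDict c 0) 0

-- the while True loop of Source B: yield, then break once i+k > n; fuel is exact for every k
def pvLoopB (cs : List Char) (k i : Int) : Nat → List (List Int)
  | 0 => []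
  | Nat.succ f =>
    [pvHashB (PySem.List.slice cs (some i) (some (i + k))), i] ::
      (if i + 1 + k > (cs.length : Int) then [] else pvLoopB cs k (i + 1) f)

def subsequenceHashes_alt (seq : String) (k : Int) : List (List Int) :=
  pvLoopB seq.toList k 0 ((((seq.toList.length : Int) - k).toNat) + 1)

-- ===== PRECONDITION & SPEC =====
-- Pre_ excludes exactly k < 0, where the Python A always raises IndexError (seq[firstInd] runs past the end).
def Pre_subsequenceHashes (seq : String) (k : Int) : Prop := 0 ≤ k
instance (seq : String) (k : Int) : Decidable (Pre_subsequenceHashes seq k) := by unfold Pre_subsequenceHashes; infer_instance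
def pvWitness_subsequenceHashes : String × Int := ("ATGCa", 2)

-- For k = 0 on a string containing an A/T/G/C letter (either case) A yields garbage hashes rolled out of
-- leftover loop state (e.g. -4 for 'A') while B yields 0 for every empty window, the intended hash.
def D_subsequenceHashes (seq : String) (k : Int) : Prop :=
  k = 0 ∧ (seq.toList.any (fun c => (['A','T','G','C','a','t','g','c'] : List Char).contains c)) = true
instance (seq : String) (k : Int) : Decidable (D_subsequenceHashes seq k) := by unfold D_subsequenceHashes; infer_instance

def Spec_subsequenceHashes (seq : String) (k : Int) (out : List (List Int)) : Prop :=
  ¬ D_subsequenceHashes seq k → out = subsequenceHashes_alt seq k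
instance (seq : String) (k : Int) (out : List (List Int)) : Decidable (Spec_subsequenceHashes seq k out) := by unfold Spec_subsequenceHashes; infer_instance

def pvDiffWitness_subsequenceHashes : String × Int := ("A", 0)
def pvDiffWitnessOut_subsequenceHashes : (List (List Int)) × (List (List Int)) :=
  ([[0, 0], [-4, 1]], [[0, 0], [0, 1]])

-- ===== CLAIM (what is proved, stated in full; the proofs are below) =====
def Claim_unchanged_subsequenceHashes : Prop := ∀ (seq : String) (k : Int), Dom_subsequenceHashes seq k → Pre_subsequenceHashes seq k → Spec_subsequenceHashes seq k (subsequenceHashes seq k)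
def Claim_changed_subsequenceHashes : Prop := Dom_subsequenceHashes (pvDiffWitness_subsequenceHashes.1) (pvDiffWitness_subsequenceHashes.2) ∧ Pre_subsequenceHashes (pvDiffWitness_subsequenceHashes.1) (pvDiffWitness_subsequenceHashes.2) ∧ D_subsequenceHashes (pvDiffWitness_subsequenceHashes.1) (pvDiffWitness_subsequenceHashes.2) ∧ subsequenceHashes (pvDiffWitness_subsequenceHashes.1) (pvDiffWitness_subsequenceHashes.2) = pvDiffWitnessOut_subsequenceHashes.1 ∧ subsequenceHashes_alt (pvDiffWitness_subsequenceHashes.1) (pvDiffWitness_subsequenceHashes.2) = pvDiffWitnessOut_subsequenceHashes.2 ∧ pvDiffWitnessOut_subsequenceHashes.1 ≠ pvDiffWitnessOut_subsequenceHashes.2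

-- ===== LEMMAS AND PROOFS =====

-- Horner fold from an arbitrary accumulator
theorem pvHashB_gen (w : List Char) : ∀ a : Int,
    w.foldl (fun h c => h * 5 + PySem.Dict.getD pvBaseDict c 0) a = a * 5 ^ w.length + pvHashB w := by
  induction w with
  | nil => intro a; simp [pvHashB]
  | cons c w ih =>
    intro a
    simp only [List.foldl_cons, List.length_cons, pvHashB]
    rw [ih, ih]
    ring

theorem pvHashB_cons (c : Char) (w : List Char) :
    pvHashB (c :: w) = PySem.Dict.getD pvBaseDict c 0 * 5 ^ w.length + pvHashB w := by
  conv_lhs => simp only [pvHashB, List.foldl_cons]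
  rw [pvHashB_gen]
  ring

theorem pvHashB_snoc (w : List Char) (d : Char) :
    pvHashB (w ++ [d]) = pvHashB w * 5 + PySem.Dict.getD pvBaseDict d 0 := by
  simp [pvHashB, List.foldl_append]

-- the __init__ countdown loop, characterised
theorem initGen (w : List Char) : ∀ (m : Nat), m < w.length → ∀ (h base : Int),
    (PySem.List.pyRange (m : Int) (-1) (-1)).foldl
      (fun (st : Int × Int) i =>
        (st.1 + (PySem.Dict.getD pvBaseDict (PySem.List.pyGetD w i ' ') 0) * st.2,
         if i ≠ 0 then st.2 * 5 else st.2)) (h, base)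
    = (h + base * pvHashB (w.take (m + 1)), base * 5 ^ m) := by
  intro m
  induction m with
  | zero =>
    intro hm h base
    rw [show ((0 : Nat) : Int) = 0 by norm_num,
        PySem.List.pyRange_neg_one_cons (by norm_num),
        show (0 : Int) - 1 = -1 by norm_num,
        PySem.List.pyRange_neg_one_eq_nil (by norm_num)]
    have e1 : PySem.List.pyGetD w (0 : Int) ' ' = w[0] := by
      rw [show (0 : Int) = ((0 : Nat) : Int) by norm_num, PySem.List.pyGetD_natCast]
      exact List.getD_eq_getElem w ' ' hm
    have e2 : w.take 1 = [w[0]] := by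
      have := List.take_append_getElem (l := w) (i := 0) hm
      simpa using this.symm
    simp [e1, e2, pvHashB]
    ring
  | succ m ih =>
    intro hm h base
    have hm' : m < w.length := by omega
    rw [PySem.List.pyRange_neg_one_cons (by push_cast; omega)]
    have e0 : ((m + 1 : Nat) : Int) - 1 = ((m : Nat) : Int) := by push_cast; ring
    rw [List.foldl_cons, e0]
    have e1 : PySem.List.pyGetD w ((m + 1 : Nat) : Int) ' ' = w[m + 1] := by
      rw [PySem.List.pyGetD_natCast]
      exact List.getD_eq_getElem w ' ' hm
    have e2 : (((m + 1 : Nat) : Int) ≠ 0) := by push_cast; omega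
    simp only [e1, if_pos e2]
    rw [ih hm']
    have e3 : w.take (m + 1 + 1) = w.take (m + 1) ++ [w[m + 1]] :=
      (List.take_append_getElem hm).symm
    rw [e3, pvHashB_snoc]
    refine Prod.ext ?_ ?_ <;> simp <;> ring

theorem pvInitA_eq (w : List Char) :
    pvInitA w = (pvHashB w, 5 ^ (w.length - 1)) := by
  rcases Nat.eq_zero_or_pos w.length with h0 | hpos
  · have : w = [] := List.eq_nil_of_length_eq_zero h0
    subst this
    simp [pvInitA, pvHashB, PySem.List.pyRange_neg_one_eq_nil (by norm_num : (-1 : Int) ≤ -1)]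
  · have e : ((w.length : Int) - 1) = ((w.length - 1 : Nat) : Int) := by omega
    have hm : w.length - 1 < w.length := by omega
    simp only [pvInitA, e]
    rw [initGen w (w.length - 1) hm 0 1]
    have : w.length - 1 + 1 = w.length := by omega
    simp [this]

-- the while-loop of A versus the tail of B's loop, for k = K ≥ 1
theorem loopEq (cs : List Char) (K : Nat) (hK : 1 ≤ K) :
    ∀ (m j : Nat), j + K + m = cs.length →
    pvLoopA cs (j : Int) ((j : Int) + (K : Int)) (pvHashB ((cs.drop j).take K)) (5 ^ (K - 1)) m
      = if ((j : Int) + 1 + (K : Int) > (cs.length : Int)) then []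
        else pvLoopB cs (K : Int) ((j : Int) + 1) m := by
  obtain ⟨K', rfl⟩ : ∃ K', K = K' + 1 := ⟨K - 1, by omega⟩
  simp only [Nat.add_sub_cancel]
  intro m
  induction m with
  | zero =>
    intro j hj
    rw [if_pos (by push_cast; omega)]
    rfl
  | succ m ih =>
    intro j hj
    have hjlt : j < cs.length := by omega
    have hjK : j + (K' + 1) < cs.length := by omega
    simp only [pvLoopA]
    rw [if_pos (by push_cast; omega)]
    have e1 : PySem.List.pyGetD cs (j : Int) ' ' = cs[j] := by
      rw [PySem.List.pyGetD_natCast]; exact List.getD_eq_getElem cs ' ' hjlt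
    have e2 : (j : Int) + ((K' + 1 : Nat) : Int) = ((j + (K' + 1) : Nat) : Int) := by push_cast; ring
    have e3 : PySem.List.pyGetD cs ((j : Int) + ((K' + 1 : Nat) : Int)) ' ' = cs[j + (K' + 1)] := by
      rw [e2, PySem.List.pyGetD_natCast]; exact List.getD_eq_getElem cs ' ' hjK
    have hK'len : K' < (cs.drop (j + 1)).length := by
      rw [List.length_drop]; omega
    have htK' : ((cs.drop (j + 1)).take K').length = K' := by
      rw [List.length_take, List.length_drop]; omega
    have hwin1 : (cs.drop j).take (K' + 1) = cs[j] :: (cs.drop (j + 1)).take K' := by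
      rw [List.drop_eq_getElem_cons hjlt, List.take_succ_cons]
    have hwin2 : (cs.drop (j + 1)).take (K' + 1)
        = (cs.drop (j + 1)).take K' ++ [cs[j + (K' + 1)]] := by
      have hidx : j + 1 + K' = j + (K' + 1) := by omega
      rw [← List.take_append_getElem hK'len, List.getElem_drop]
      simp only [hidx]
    have hroll : pvNextA (pvHashB ((cs.drop j).take (K' + 1))) (5 ^ K') cs[j] cs[j + (K' + 1)]
        = pvHashB ((cs.drop (j + 1)).take (K' + 1)) := by
      rw [hwin1, hwin2, pvHashB_cons, pvHashB_snoc, htK']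
      simp only [pvNextA]
      ring
    rw [e1, e3, hroll]
    have e5 : (j : Int) + 1 = ((j + 1 : Nat) : Int) := by push_cast; ring
    have hnext : pvLoopA cs ((j : Int) + 1) ((j : Int) + ((K' + 1 : Nat) : Int) + 1)
          (pvHashB ((cs.drop (j + 1)).take (K' + 1))) (5 ^ K') m
        = if (((j + 1 : Nat) : Int) + 1 + ((K' + 1 : Nat) : Int) > (cs.length : Int)) then []
          else pvLoopB cs ((K' + 1 : Nat) : Int) (((j + 1 : Nat) : Int) + 1) m := by
      rw [show ((j : Int) + ((K' + 1 : Nat) : Int) + 1) = (((j + 1 : Nat) : Int) + ((K' + 1 : Nat) : Int)) by push_cast; ring, e5]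
      exact ih (j + 1) (by omega)
    rw [if_neg (by push_cast; omega)]
    simp only [pvLoopB]
    have hslice : PySem.List.slice cs (some ((j : Int) + 1)) (some ((j : Int) + 1 + ((K' + 1 : Nat) : Int)))
        = (cs.drop (j + 1)).take (K' + 1) := by
      rw [e5, PySem.List.slice_natCast_add]
    rw [hslice]
    refine List.cons_eq_cons.mpr ⟨rfl, ?_⟩
    rw [hnext]
    congr 1

-- the k = 0 loops, when no character of cs scores
theorem loopZero (cs : List Char) (hz : ∀ c ∈ cs, PySem.Dict.getD pvBaseDict c 0 = 0) :
    ∀ (m j : Nat), j + m = cs.length →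
    pvLoopA cs (j : Int) (j : Int) 0 1 m
      = if ((j : Int) + 1 + 0 > (cs.length : Int)) then []
        else pvLoopB cs 0 ((j : Int) + 1) m := by
  intro m
  induction m with
  | zero =>
    intro j hj
    rw [if_pos (by omega)]
    rfl
  | succ m ih =>
    intro j hj
    have hjlt : j < cs.length := by omega
    simp only [pvLoopA]
    rw [if_pos (by omega)]
    have e1 : PySem.List.pyGetD cs (j : Int) ' ' = cs[j] := by
      rw [PySem.List.pyGetD_natCast]; exact List.getD_eq_getElem cs ' ' hjlt
    have hb : PySem.Dict.getD pvBaseDict cs[j] 0 = 0 := hz _ (List.getElem_mem hjlt)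
    have hroll : pvNextA 0 1 cs[j] cs[j] = 0 := by
      simp [pvNextA, hb]
    rw [e1, hroll]
    rw [if_neg (by omega)]
    simp only [pvLoopB]
    have hslice : PySem.List.slice cs (some ((j : Int) + 1)) (some ((j : Int) + 1 + 0))
        = ([] : List Char) := by
      rw [show (j : Int) + 1 + 0 = ((j + 1 : Nat) : Int) + ((0 : Nat) : Int) by push_cast; ring,
          show (j : Int) + 1 = ((j + 1 : Nat) : Int) by push_cast; ring,
          PySem.List.slice_natCast_add]
      simp
    rw [hslice]
    refine List.cons_eq_cons.mpr ⟨by simp [pvHashB], ?_⟩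
    have hrec := ih (j + 1) (by omega)
    rw [show (j : Int) + 1 = ((j + 1 : Nat) : Int) by push_cast; ring, hrec]

theorem bC_zero (c : Char)
    (h : (['A','T','G','C','a','t','g','c'] : List Char).contains c = false) :
    PySem.Dict.getD pvBaseDict c 0 = 0 := by
  simp only [List.contains_cons, List.contains_nil, Bool.or_eq_false_iff, beq_eq_false_iff_ne, ne_eq] at h
  obtain ⟨h1,h2,h3,h4,h5,h6,h7,h8,-⟩ := h
  have hmk : pvBaseDict = PySem.Dict.mk [('A',1),('T',2),('G',3),('C',4),('a',1),('t',2),('g',3),('c',4)] := by decide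
  rw [hmk]
  simp [PySem.Dict.getD, Ne.symm h1, Ne.symm h2, Ne.symm h3, Ne.symm h4, Ne.symm h5, Ne.symm h6,
    Ne.symm h7, Ne.symm h8, PySem.Dict.get?]

theorem subsequenceHashes_spec : Claim_unchanged_subsequenceHashes := by
  intro seq k _hdom hpre hnd
  obtain ⟨K, rfl⟩ : ∃ K : Nat, k = (K : Int) := ⟨k.toNat, (Int.toNat_of_nonneg hpre).symm⟩
  rcases Nat.eq_zero_or_pos K with hK0 | hKpos
  · -- k = 0: excluded by D_ unless no character scores; then both sides are all-zero hashes
    subst hK0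
    have hany : (seq.toList.any (fun c => (['A','T','G','C','a','t','g','c'] : List Char).contains c)) = false := by
      cases h : seq.toList.any (fun c => (['A','T','G','C','a','t','g','c'] : List Char).contains c) with
      | false => rfl
      | true => exact absurd ⟨by norm_num, h⟩ hnd
    have hz : ∀ c ∈ seq.toList, PySem.Dict.getD pvBaseDict c 0 = 0 := by
      intro c hc
      apply bC_zero
      have := (List.any_eq_false.mp hany) c hc
      simpa using this
    have hsl : PySem.List.slice seq.toList (some (0:Int)) (some (0:Int)) = ([] : List Char) := by
      simp [pysem]
    have hsl2 : PySem.List.slice seq.toList (some (0:Int)) (some ((0:Int) + 0)) = ([] : List Char) := by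
      simp [pysem]
    have hinit : pvInitA ([] : List Char) = (0, 1) := by
      rw [pvInitA_eq]; simp [pvHashB]
    have hz0 := loopZero seq.toList hz seq.toList.length 0 (by omega)
    simp only [Nat.cast_zero] at hz0
    simp only [subsequenceHashes, subsequenceHashes_alt, Nat.cast_zero, hsl, hsl2, hinit,
      show ((seq.toList.length : Int) - 0).toNat = seq.toList.length from by omega, pvLoopB]
    rw [hz0]
    simp [pvHashB]
  · -- k = K ≥ 1
    have hsl : PySem.List.slice seq.toList (some (0:Int)) (some ((K:Nat):Int)) = seq.toList.take K := by
      simp [pysem]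
    by_cases hKn : K ≤ seq.toList.length
    · -- K ≤ n : full first window, then the rolling loop
      have hlen : (seq.toList.take K).length = K := by
        rw [List.length_take]; omega
      have hfuel : ((seq.toList.length : Int) - ((K:Nat):Int)).toNat = seq.toList.length - K := by
        omega
      have hloop := loopEq seq.toList K hKpos (seq.toList.length - K) 0 (by omega)
      simp only [Nat.cast_zero, zero_add, List.drop_zero] at hloop
      have hsl2 : PySem.List.slice seq.toList (some (0:Int)) (some ((0:Int) + ((K:Nat):Int))) = seq.toList.take K := by
        simp [pysem]
      simp only [subsequenceHashes, subsequenceHashes_alt, hsl, hsl2, pvInitA_eq, hlen, hfuel, pvLoopB]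
      rw [hloop]
      norm_num
    · -- n < K : a single truncated window on both sides
      have hnK : seq.toList.length < K := by omega
      have htake : seq.toList.take K = seq.toList := List.take_of_length_le (le_of_lt hnK)
      have hfuel0 : ((seq.toList.length : Int) - ((K:Nat):Int)).toNat = 0 := by omega
      have hsl2 : PySem.List.slice seq.toList (some (0:Int)) (some ((0:Int) + ((K:Nat):Int))) = seq.toList.take K := by
        simp [pysem]
      simp only [subsequenceHashes, subsequenceHashes_alt, hsl, hsl2, htake, pvInitA_eq, hfuel0, pvLoopB, pvLoopA]
      rw [if_pos (by omega)]

-- ===== VERDICT (by name: the statement is the Claim_ definition above) =====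
set_option maxRecDepth 8192 in
theorem subsequenceHashes_changed : Claim_changed_subsequenceHashes := by
  unfold Claim_changed_subsequenceHashes
  refine ⟨by decide, by decide, by decide, ?_, ?_, by decide⟩ <;> rfl
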